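-- pv_equiv track=rewrite | github.com/slynch8/10x | PythonScripts/CMakeIntegration/CMakeIntegration.py | macro_expansion
-- ===== SOURCE A (Python) =====
-- def macro_expansion(target_string: str, macros) -> str:
--     i = int(0)
--     # TODO: unescape strings
--     out_string = ""
--     while i < len(target_string):
--         em = i
--         if target_string[i] == "$":  # potential macro expansion
--             while em < len(target_string) and target_string[em] != "}":
--                 em += 1
--             macro_key = target_string[i : em + 1]
--             macro_value = macro_key
--             if macro_key in macros and macros[macro_key] != None:
--                 macro_value = macros[macro_key]
--             out_string += macro_value
--             # jump past macro expansion
--             i = em + 1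
--         else:
--             while em < len(target_string) and target_string[em] != "$":
--                 em += 1
--             out_string += target_string[i:em]
--             # jump past substring
--             i = em
--
--     return out_string
-- ===== SOURCE B (Python) =====
-- import re
--
-- def macro_expansion(target_string: str, macros) -> str:
--     def repl(m):
--         key = m.group(0)
--         if key in macros and macros[key] is not None:
--             return macros[key]
--         return key
--     return re.sub(r'\$[^}]*\}?', repl, target_string)
-- ===== Notes on version B (the rewrite author's own statement) =====
-- stated objective: idiomatic
-- what changed: Replaced the hand-rolled index-walking while-loops (manual scan for '}'/'$' with slice bookkeeping) by a single re.sub over the token pattern \$[^}]*\}? with a replacement callback that looks the matched token up in macros.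
import Mathlib
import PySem

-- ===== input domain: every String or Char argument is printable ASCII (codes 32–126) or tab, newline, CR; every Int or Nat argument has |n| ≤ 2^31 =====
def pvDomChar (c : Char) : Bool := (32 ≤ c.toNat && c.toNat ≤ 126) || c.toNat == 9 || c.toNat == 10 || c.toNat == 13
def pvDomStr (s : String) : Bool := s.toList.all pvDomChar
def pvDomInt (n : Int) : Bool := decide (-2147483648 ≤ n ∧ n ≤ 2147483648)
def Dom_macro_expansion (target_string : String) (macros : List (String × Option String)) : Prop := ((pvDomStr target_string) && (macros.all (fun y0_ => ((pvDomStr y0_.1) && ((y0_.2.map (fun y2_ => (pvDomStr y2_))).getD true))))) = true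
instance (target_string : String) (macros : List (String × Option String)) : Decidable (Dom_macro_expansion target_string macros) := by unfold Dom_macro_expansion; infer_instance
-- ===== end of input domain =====

-- B replaces A's manual index-walking scan with a single regex-substitution pass
-- (re.sub r'\$[^}]*\}?'), ported as a structural tokenizer; objective: idiomatic, same cost.


-- ===== PORT A =====
-- inner 'while em < len and s[em] != stop: em += 1' (exact hand port of the two while loops)
def pvScanA (cs : List Char) (stop : Char) (em : Nat) : Nat :=
  if h : em < cs.length then
    if cs[em] = stop then em else pvScanA cs stop (em + 1)
  else em
termination_by cs.length - em

theorem pvScanA_ge (cs : List Char) (stop : Char) (em : Nat) : em ≤ pvScanA cs stop em := by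
  fun_induction pvScanA cs stop em with
  | case1 => omega
  | case2 => omega
  | case3 => omega

theorem pvScanA_gt (cs : List Char) (stop : Char) (em : Nat) (h : em < cs.length)
    (hne : cs[em] ≠ stop) : em < pvScanA cs stop em := by
  rw [pvScanA, dif_pos h, if_neg hne]
  have := pvScanA_ge cs stop (em + 1); omega

-- 'macro_key in macros and macros[macro_key] != None' then 'macro_value = macros[macro_key]'
-- (dict → assoc list, lookup = first match)
def pvLookupA (macros : List (String × Option String)) (key : List Char) : List Char :=
  match macros.find? (fun p => p.1 == String.ofList key) with
  | some (_, some v) => v.toList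
  | _ => key

-- the outer 'while i < len(target_string)' loop; slices s[i:em+1] / s[i:em] ported by hand
-- as (drop i).take (⋯ - i), exact for the 0 ≤ i ≤ em ≤ len indices this loop uses
def pvLoopA (cs : List Char) (macros : List (String × Option String)) (i : Nat)
    (out : List Char) : List Char :=
  if h : i < cs.length then
    if cs[i] = '$' then
      let em := pvScanA cs '}' i
      pvLoopA cs macros (em + 1) (out ++ pvLookupA macros ((cs.drop i).take (em + 1 - i)))
    else
      let em := pvScanA cs '$' i
      pvLoopA cs macros em (out ++ (cs.drop i).take (em - i))
  else out
termination_by cs.length - i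
decreasing_by
  · have := pvScanA_ge cs '}' i; omega
  · have := pvScanA_gt cs '$' i h (by assumption); omega

def macro_expansion (target_string : String) (macros : List (String × Option String)) : String :=
  String.ofList (pvLoopA target_string.toList macros 0 [])

-- ===== PORT B =====
-- re.sub's replacement callback: macros[key] if present and not None else the match itself
def pvReplB (macros : List (String × Option String)) (key : List Char) : List Char :=
  match macros.find? (fun p => p.1 == String.ofList key) with
  | some (_, some v) => v.toList
  | _ => key

-- re.sub(r'\$[^}]*\}?', repl, s): left-to-right scan, at '$' the match is
-- '$' + longest run of non-'}' + an optional '}'; unmatched chars are copied through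
def pvSubB (macros : List (String × Option String)) : List Char → List Char
  | [] => []
  | c :: rest =>
    if c = '$' then
      let body := rest.takeWhile (· ≠ '}')
      match hdw : rest.dropWhile (· ≠ '}') with  -- hdw: for the termination proof
      | [] => pvReplB macros ('$' :: body)
      | _ :: tail => pvReplB macros ('$' :: (body ++ ['}'])) ++ pvSubB macros tail
    else c :: pvSubB macros rest
termination_by l => l.length
decreasing_by
  · have := List.length_dropWhile_le (fun c => decide (c ≠ '}')) rest
    rename_i hdw _; rw [hdw] at this; simp at this ⊢; omega
  · simp

def macro_expansion_alt (target_string : String) (macros : List (String × Option String)) : String :=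
  String.ofList (pvSubB macros target_string.toList)

-- ===== PRECONDITION & SPEC =====
def Spec_macro_expansion (target_string : String) (macros : List (String × Option String)) (out : String) : Prop := out = macro_expansion_alt target_string macros
instance (target_string : String) (macros : List (String × Option String)) (out : String) : Decidable (Spec_macro_expansion target_string macros out) := by unfold Spec_macro_expansion; infer_instance

-- ===== CLAIM (what is proved, stated in full; the proofs are below) =====
def Claim_equal_macro_expansion : Prop := ∀ (target_string : String) (macros : List (String × Option String)), Dom_macro_expansion target_string macros → Spec_macro_expansion target_string macros (macro_expansion target_string macros)

-- ===== LEMMAS AND PROOFS =====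

-- the index scan equals i + length of the non-stop run of the suffix
theorem pvScanA_eq (cs : List Char) (stop : Char) (i : Nat) :
    pvScanA cs stop i = i + ((cs.drop i).takeWhile (· ≠ stop)).length := by
  fun_induction pvScanA cs stop i with
  | case1 i h heq =>
    rw [← List.getElem_cons_drop h, List.takeWhile_cons]
    simp [heq]
  | case2 i h heq ih =>
    rw [ih, ← List.getElem_cons_drop h, List.takeWhile_cons]
    simp [heq]; omega
  | case3 i h =>
    rw [List.drop_eq_nil_of_le (by omega)]; simp

-- the two replacement helpers are the same function
theorem pvLookupA_eq_pvReplB : pvLookupA = pvReplB := rfl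

-- the head of a nonempty dropWhile (· ≠ '}') run is '}'
theorem pvDropWhileHead (l m : List Char) (c : Char)
    (h : l.dropWhile (· ≠ '}') = c :: m) : c = '}' := by
  have := List.head?_dropWhile_not (fun x => decide (x ≠ '}')) l
  rw [h] at this
  simpa using this

-- drop past the takeWhile run is dropWhile
theorem pvDropLen (p : Char → Bool) (l : List Char) :
    l.drop (l.takeWhile p).length = l.dropWhile p := by
  induction l with
  | nil => simp
  | cons a l ih => by_cases h : p a <;> simp [h, ih]

-- copying a '$'-free run char by char through pvSubB is appending it
theorem pvSubB_copy (macros : List (String × Option String)) (t d : List Char)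
    (ht : ∀ c ∈ t, c ≠ '$') : pvSubB macros (t ++ d) = t ++ pvSubB macros d := by
  induction t with
  | nil => simp
  | cons c t ih =>
    have hc : c ≠ '$' := ht c (by simp)
    rw [List.cons_append, pvSubB, if_neg hc, ih (fun x hx => ht x (by simp [hx]))]
    simp

theorem pvLoopA_eq (cs : List Char) (macros : List (String × Option String)) :
    ∀ i out, pvLoopA cs macros i out = out ++ pvSubB macros (cs.drop i) := by
  intro i out
  fun_induction pvLoopA cs macros i out with
  | case1 i out h heq em ih =>
    rw [ih, List.append_assoc]
    congr 1
    have hcons : cs.drop i = '$' :: cs.drop (i + 1) := by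
      rw [← List.getElem_cons_drop h, heq]
    have hem : em = i + ((cs.drop i).takeWhile (· ≠ '}')).length := pvScanA_eq cs '}' i
    rw [hcons, List.takeWhile_cons] at hem
    simp only [show decide (('$' : Char) ≠ '}') = true by decide, if_pos] at hem
    set r := cs.drop (i + 1) with hR
    have hsplit : r = r.takeWhile (· ≠ '}') ++ r.dropWhile (· ≠ '}') :=
      (List.takeWhile_append_dropWhile).symm
    set t := r.takeWhile (· ≠ '}') with hT
    set d := r.dropWhile (· ≠ '}') with hD
    -- A-side pieces: the slice s[i:em+1] and the suffix s[em+1:]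
    have htake : (cs.drop i).take (em + 1 - i) = '$' :: (t ++ d.take 1) := by
      have h1 : em + 1 - i = t.length + 2 := by simp [hem]; omega
      rw [hcons, h1, hsplit, List.take_succ_cons, List.take_append,
          List.take_of_length_le (by omega), show t.length + 1 - t.length = 1 by omega]
    have hdrop : cs.drop (em + 1) = d.drop 1 := by
      have h3 : (cs.drop i).drop (t.length + 2) = cs.drop (em + 1) := by
        rw [List.drop_drop]; congr 1; simp [hem]; omega
      rw [← h3, hcons, hsplit, List.drop_succ_cons, List.drop_length_add_append]
    rw [htake, hdrop, hcons, pvSubB, if_pos rfl]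
    split
    · rename_i heq2
      have hd : d = [] := by rw [hD]; exact heq2
      rw [pvLookupA_eq_pvReplB, hd]
      have hp : (fun x => !decide (x = '}')) = (fun x : Char => decide (x ≠ '}')) := by
        funext x; simp
      simp [pvSubB]
      rw [hp, ← hT]
    · rename_i c tail heq2
      have hd : d = c :: tail := by rw [hD]; exact heq2
      have hc : c = '}' := pvDropWhileHead r tail c hd
      rw [pvLookupA_eq_pvReplB, hd, hc]
      have hp : (fun x => !decide (x = '}')) = (fun x : Char => decide (x ≠ '}')) := by
        funext x; simp
      simp
      rw [hp, ← hT]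
  | case2 i out h heq em ih =>
    rw [ih, List.append_assoc]
    congr 1
    have hem : em = i + ((cs.drop i).takeWhile (· ≠ '$')).length := pvScanA_eq cs '$' i
    have hpre : (cs.drop i).takeWhile (· ≠ '$') <+: cs.drop i := List.takeWhile_prefix _
    have htk : (cs.drop i).take (em - i) = (cs.drop i).takeWhile (· ≠ '$') := by
      rw [hem, show i + ((cs.drop i).takeWhile (· ≠ '$')).length - i
            = ((cs.drop i).takeWhile (· ≠ '$')).length by omega]
      exact (List.prefix_iff_eq_take.mp hpre).symm
    have hdd : cs.drop em = (cs.drop i).dropWhile (· ≠ '$') := by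
      rw [← pvDropLen (fun x => decide (x ≠ '$')) (cs.drop i), List.drop_drop]
      congr 1 <;> omega
    rw [htk, hdd]
    rw [← pvSubB_copy macros _ _ (fun c hc => by
      have := List.mem_takeWhile_imp hc; simpa using this)]
    rw [List.takeWhile_append_dropWhile]
  | case3 i out h =>
    rw [List.drop_eq_nil_of_le (by omega)]
    rw [pvSubB]; simp

-- ===== VERDICT (by name: the statement is the Claim_ definition above) =====
theorem macro_expansion_spec : Claim_equal_macro_expansion := by
  intro s macros _
  unfold Spec_macro_expansion macro_expansion macro_expansion_alt
  rw [pvLoopA_eq]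
  simp
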